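-- pv_equiv track=rewrite | github.com/Iterator-alt/stage-2 | src/utils/brand_detector.py | _find_containing_sentence
-- ===== SOURCE A (Python) =====
-- def _find_containing_sentence(text: str, start: int, end: int) -> str:
--     """Find the sentence that contains the match."""
--     sentence_endings = ['.', '!', '?', '\n', ';']
--
--     # Find sentence start
--     sentence_start = 0
--     for i in range(start - 1, -1, -1):
--         if text[i] in sentence_endings:
--             sentence_start = i + 1
--             break
--
--     # Find sentence end
--     sentence_end = len(text)
--     for i in range(end, len(text)):
--         if text[i] in sentence_endings:
--             sentence_end = i + 1
--             break
--
--     return text[sentence_start:sentence_end].strip()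
-- ===== SOURCE B (Python) =====
-- def _find_containing_sentence(text: str, start: int, end: int) -> str:
--     """Find the sentence that contains the match."""
--     endings = '.!?\n;'
--
--     # last delimiter before the match, via per-delimiter rfind on text[0:start]
--     sentence_start = max((text.rfind(ch, 0, max(start, 0)) for ch in endings), default=-1) + 1
--
--     # first delimiter at or after the match, via per-delimiter find from `end`
--     found = [i for i in (text.find(ch, end) for ch in endings) if i != -1]
--     sentence_end = min(found) + 1 if found else len(text)
--
--     return text[sentence_start:sentence_end].strip()
-- ===== Notes on version B (the rewrite author's own statement) =====
-- stated objective: idiomatic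
-- what changed: Replaces A's two character-by-character membership scans with per-delimiter str.rfind/str.find searches combined by max (last delimiter before the match) and min over the found indices (first delimiter after it).
-- intended difference: For in-range negative end on a text containing a sentence delimiter, A's forward loop uses Python's negative-index wraparound so sentence_end can land at or before 0 and A returns a truncated (often empty) string, while B returns the sentence around the clamped match position, which is the intended value. — e.g. on _find_containing_sentence("ab;", 0, -1): A returns "", B returns "ab;"
import Mathlib
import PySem

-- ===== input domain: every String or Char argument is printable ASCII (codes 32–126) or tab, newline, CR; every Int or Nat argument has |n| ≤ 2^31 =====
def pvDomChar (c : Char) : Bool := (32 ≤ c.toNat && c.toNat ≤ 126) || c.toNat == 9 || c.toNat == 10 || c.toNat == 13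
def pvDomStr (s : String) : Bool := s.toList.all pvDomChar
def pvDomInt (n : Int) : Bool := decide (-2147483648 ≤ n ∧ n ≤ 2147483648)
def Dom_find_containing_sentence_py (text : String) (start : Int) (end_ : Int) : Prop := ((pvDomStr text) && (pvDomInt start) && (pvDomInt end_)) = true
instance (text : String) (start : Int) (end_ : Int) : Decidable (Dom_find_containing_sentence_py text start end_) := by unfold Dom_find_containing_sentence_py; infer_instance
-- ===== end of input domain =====

-- B replaces A's two character-by-character membership scans by per-delimiter rfind/find
-- searches combined with max/min (objective: idiomatic; same asymptotic cost).


-- ===== PORT A =====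
-- sentence_endings = ['.', '!', '?', '\n', ';']
def pvDelims : List Char := ['.', '!', '?', '\n', ';']

-- the backward loop 'for i in range(start-1, -1, -1): if text[i] in endings: sentence_start = i+1; break'
def pvALoop1 (cs : List Char) : List Int → Int
  | [] => 0
  | i :: rest =>
    match PySem.List.pyGet? cs i with
    | none => 0  -- Python raises IndexError here; excluded by Pre_
    | some c => if pvDelims.contains c then i + 1 else pvALoop1 cs rest

-- the forward loop 'for i in range(end, len(text)): if text[i] in endings: sentence_end = i+1; break'
def pvALoop2 (cs : List Char) : List Int → Int
  | [] => (cs.length : Int)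
  | i :: rest =>
    match PySem.List.pyGet? cs i with
    | none => 0  -- Python raises IndexError here; excluded by Pre_
    | some c => if pvDelims.contains c then i + 1 else pvALoop2 cs rest

def find_containing_sentence_py (text : String) (start : Int) (end_ : Int) : String :=
  let cs := text.toList
  let sentence_start := pvALoop1 cs (PySem.List.pyRange (start - 1) (-1) (-1))
  let sentence_end := pvALoop2 cs (PySem.List.pyRange end_ (cs.length : Int) 1)
  String.ofList (PySem.Chars.strip (PySem.Chars.slice cs (some sentence_start) (some sentence_end)))

-- ===== PORT B =====
-- B: sentence_start = max((text.rfind(ch, 0, max(start, 0)) for ch in endings), default=-1) + 1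
--    found = [i for i in (text.find(ch, end) for ch in endings) if i != -1]
--    sentence_end = min(found) + 1 if found else len(text)
-- str.rfind / str.find with bounds are the PySem primitives rfindFrom / findFrom;
-- max(..., default=-1) is PySem.List.maxD, min(found) is PySem.List.min? (found nonempty).
def find_containing_sentence_py_alt (text : String) (start : Int) (end_ : Int) : String :=
  let cs := text.toList
  let sentence_start :=
    PySem.List.maxD (pvDelims.map (fun ch => PySem.Chars.rfindFrom cs [ch] 0 (some (max start 0)))) (fun x => x) (-1) + 1
  let found := (pvDelims.map (fun ch => PySem.Chars.findFrom cs [ch] end_ none)).filter (fun i => i != -1)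
  let sentence_end :=
    match PySem.List.min? found (fun x => x) with
    | some m => m + 1
    | none => (cs.length : Int)
  String.ofList (PySem.Chars.strip (PySem.Chars.slice cs (some sentence_start) (some sentence_end)))

-- ===== PRECONDITION & SPEC =====
-- start and end are offsets into text; A raises IndexError exactly when start > len(text)
-- (the backward loop reads text[start-1]) or end < -len(text) (the forward loop reads text[end]).
-- Pre_ excludes exactly those raising inputs and nothing else.
def Pre_find_containing_sentence_py (text : String) (start : Int) (end_ : Int) : Prop :=
  start ≤ PySem.Str.len text ∧ -(PySem.Str.len text) ≤ end_
instance (text : String) (start : Int) (end_ : Int) : Decidable (Pre_find_containing_sentence_py text start end_) := by unfold Pre_find_containing_sentence_py; infer_instance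

def pvWitness_find_containing_sentence_py : String × Int × Int := ("Hi. There you! Ok", 5, 9)

-- On in-range negative end where A's wrapped forward scan makes sentence_end land at or below 0
-- (the first delimiter at or after the wrapped position is the final character, or no delimiter
-- follows it at all) and the intended sentence is not all whitespace, A returns a truncated
-- (usually empty) string while B returns the sentence around the clamped match position, which
-- is the intended value.
def D_find_containing_sentence_py (text : String) (start : Int) (end_ : Int) : Prop :=
  end_ < 0 ∧
  (let cs := text.toList
   let nd := (!pvDelims.contains ·)
   let s := (List.rdropWhile nd (cs.take start.toNat)).length
   let f := List.dropWhile nd (cs.drop (cs.length - end_.natAbs))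
   f.length = 1 ∧ ¬ (cs.drop s).all PySem.Chars.isspace ∨
   f.length = 0 ∧ ¬ (cs.drop (s.max ((cs.takeWhile nd).length + 1))).all PySem.Chars.isspace)
instance (text : String) (start : Int) (end_ : Int) : Decidable (D_find_containing_sentence_py text start end_) := by unfold D_find_containing_sentence_py; infer_instance

def Spec_find_containing_sentence_py (text : String) (start : Int) (end_ : Int) (out : String) : Prop := ¬ D_find_containing_sentence_py text start end_ → out = find_containing_sentence_py_alt text start end_
instance (text : String) (start : Int) (end_ : Int) (out : String) : Decidable (Spec_find_containing_sentence_py text start end_ out) := by unfold Spec_find_containing_sentence_py; infer_instance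

def pvDiffWitness_find_containing_sentence_py : String × Int × Int := ("ab;", 0, -1)
def pvDiffWitnessOut_find_containing_sentence_py : String × String := ("", "ab;")

-- ===== CLAIM (what is proved, stated in full; the proofs are below) =====
def Claim_unchanged_find_containing_sentence_py : Prop := ∀ (text : String) (start : Int) (end_ : Int), Dom_find_containing_sentence_py text start end_ → Pre_find_containing_sentence_py text start end_ → Spec_find_containing_sentence_py text start end_ (find_containing_sentence_py text start end_)
def Claim_changed_find_containing_sentence_py : Prop := Dom_find_containing_sentence_py (pvDiffWitness_find_containing_sentence_py.1) (pvDiffWitness_find_containing_sentence_py.2.1) (pvDiffWitness_find_containing_sentence_py.2.2) ∧ Pre_find_containing_sentence_py (pvDiffWitness_find_containing_sentence_py.1) (pvDiffWitness_find_containing_sentence_py.2.1) (pvDiffWitness_find_containing_sentence_py.2.2) ∧ D_find_containing_sentence_py (pvDiffWitness_find_containing_sentence_py.1) (pvDiffWitness_find_containing_sentence_py.2.1) (pvDiffWitness_find_containing_sentence_py.2.2) ∧ find_containing_sentence_py (pvDiffWitness_find_containing_sentence_py.1) (pvDiffWitness_find_containing_sentence_py.2.1) (pvDiffWitness_find_containing_sentence_py.2.2)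 = pvDiffWitnessOut_find_containing_sentence_py.1 ∧ find_containing_sentence_py_alt (pvDiffWitness_find_containing_sentence_py.1) (pvDiffWitness_find_containing_sentence_py.2.1) (pvDiffWitness_find_containing_sentence_py.2.2) = pvDiffWitnessOut_find_containing_sentence_py.2 ∧ pvDiffWitnessOut_find_containing_sentence_py.1 ≠ pvDiffWitnessOut_find_containing_sentence_py.2
def Claim_exact_find_containing_sentence_py : Prop := ∀ (text : String) (start : Int) (end_ : Int), Dom_find_containing_sentence_py text start end_ → Pre_find_containing_sentence_py text start end_ → D_find_containing_sentence_py text start end_ → find_containing_sentence_py text start end_ ≠ find_containing_sentence_py_alt text start end_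

-- ===== LEMMAS AND PROOFS =====

theorem pv_isPrefixOf_single (ch c : Char) (t : List Char) :
    [ch].isPrefixOf (c :: t) = (ch == c) := by
  simp [List.isPrefixOf]

theorem pv_isPrefixOf_nil (ch : Char) : [ch].isPrefixOf ([] : List Char) = false := by
  simp [List.isPrefixOf]

theorem pv_rfind_go_le (s : List Char) (ch : Char) (j : Nat) :
    PySem.Chars.rfind.go s [ch] j ≤ (j : Int) := by
  induction j with
  | zero => simp [PySem.Chars.rfind.go]; split <;> simp
  | succ n ih =>
    rw [PySem.Chars.rfind.go]
    split
    · omega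
    · push_cast; omega

theorem pv_rfind_nil (ch : Char) : PySem.Chars.rfind ([] : List Char) [ch] = -1 := by
  simp [PySem.Chars.rfind, PySem.Chars.rfind.go, List.isPrefixOf]

theorem pv_rfind_single_lt (l : List Char) (ch : Char) :
    PySem.Chars.rfind l [ch] < (l.length : Int) := by
  unfold PySem.Chars.rfind
  cases hl : l.length with
  | zero =>
    have : l = [] := List.length_eq_zero_iff.mp hl
    subst this
    simp [PySem.Chars.rfind.go, List.isPrefixOf]
  | succ m =>
    rw [show PySem.Chars.rfind.go l [ch] (m+1) = (if [ch].isPrefixOf (List.drop (m + 1) l) = true then ((m:Int) + 1) else PySem.Chars.rfind.go l [ch] m) from by rw [PySem.Chars.rfind.go]; push_cast; rfl]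
    have hdrop : l.drop (m+1) = [] := by
      apply List.drop_eq_nil_of_le; omega
    simp only [hdrop, pv_isPrefixOf_nil, Bool.false_eq_true, if_false]
    have := pv_rfind_go_le l ch m
    omega

theorem pv_single_prefix_append (ch c : Char) (l : List Char) (hl : l ≠ []) :
    [ch].isPrefixOf (l ++ [c]) = [ch].isPrefixOf l := by
  cases l with
  | nil => exact absurd rfl hl
  | cons x t => simp [List.isPrefixOf]

theorem pv_rfind_go_append (l : List Char) (c ch : Char) (j : Nat) (hj : j < l.length) :
    PySem.Chars.rfind.go (l ++ [c]) [ch] j = PySem.Chars.rfind.go l [ch] j := by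
  induction j with
  | zero =>
    rw [PySem.Chars.rfind.go, PySem.Chars.rfind.go]
    rw [pv_single_prefix_append ch c l (by intro h; subst h; simp at hj)]
  | succ n ih =>
    rw [PySem.Chars.rfind.go, PySem.Chars.rfind.go]
    have hd : List.drop (n+1) (l ++ [c]) = List.drop (n+1) l ++ [c] := by
      rw [List.drop_append_of_le_length (by omega)]
    rw [hd, pv_single_prefix_append ch c _ (by
      intro h
      have : l.length ≤ n + 1 := by
        by_contra hc
        have := List.drop_eq_nil_iff.mp h
        omega
      omega)]
    split
    · rfl
    · exact ih (by omega)

theorem pv_rfind_concat (l : List Char) (c ch : Char) :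
    PySem.Chars.rfind (l ++ [c]) [ch] =
      if ch = c then (l.length : Int) else PySem.Chars.rfind l [ch] := by
  unfold PySem.Chars.rfind
  have hlen : (l ++ [c]).length = l.length + 1 := by simp
  rw [hlen]
  rw [show PySem.Chars.rfind.go (l ++ [c]) [ch] (l.length+1) =
      (if [ch].isPrefixOf (List.drop (l.length + 1) (l ++ [c])) = true then ((l.length:Int) + 1)
       else PySem.Chars.rfind.go (l ++ [c]) [ch] l.length) from by
    rw [PySem.Chars.rfind.go]; push_cast; rfl]
  have hd1 : List.drop (l.length + 1) (l ++ [c]) = [] := by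
    apply List.drop_eq_nil_of_le; simp
  rw [hd1]
  simp only [List.isPrefixOf, Bool.false_eq_true, if_false]
  cases hl : l.length with
  | zero =>
    have : l = [] := List.length_eq_zero_iff.mp hl
    subst this
    rw [PySem.Chars.rfind.go]
    simp [List.isPrefixOf, PySem.Chars.rfind.go, beq_iff_eq]
  | succ m =>
    rw [show PySem.Chars.rfind.go (l ++ [c]) [ch] (m+1) =
        (if [ch].isPrefixOf (List.drop (m + 1) (l ++ [c])) = true then ((m:Int) + 1)
         else PySem.Chars.rfind.go (l ++ [c]) [ch] m) from by
      rw [PySem.Chars.rfind.go]; push_cast; rfl]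
    have hd2 : List.drop (m+1) (l ++ [c]) = [c] := by
      rw [← hl, List.drop_append_of_le_length (by omega)]
      simp
    rw [hd2, pv_isPrefixOf_single]
    rw [pv_rfind_go_append l c ch m (by omega)]
    by_cases hc : ch = c
    · simp [hc]
    · simp only [beq_iff_eq, hc, if_false]
      rw [show PySem.Chars.rfind.go l [ch] (m+1) =
          (if [ch].isPrefixOf (List.drop (m + 1) l) = true then ((m:Int) + 1)
           else PySem.Chars.rfind.go l [ch] m) from by
        rw [PySem.Chars.rfind.go]; push_cast; rfl]
      have : List.drop (m+1) l = [] := by apply List.drop_eq_nil_of_le; omega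
      simp [this]

theorem pv_rfindFrom_take (cs : List Char) (ch : Char) (k : Nat) (hk : k ≤ cs.length) :
    PySem.Chars.rfindFrom cs [ch] 0 (some (k : Int)) = PySem.Chars.rfind (cs.take k) [ch] := by
  unfold PySem.Chars.rfindFrom
  have h1 : ¬ ((cs.length : Int) < (k : Int)) := by exact_mod_cast not_lt.mpr hk
  have h2 : ¬ ((k : Int) < 0) := by omega
  simp only [h1, if_false, h2, if_neg (by omega : ¬ ((0:Int) < 0))]
  simp only [Int.toNat_zero, List.drop_zero, Int.toNat_natCast]
  split
  · omega
  · omega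

theorem pv_find_go_nil (ch : Char) (k : Nat) :
    PySem.Chars.find.go [ch] ([] : List Char) k = -1 := by
  rw [PySem.Chars.find.go]
  simp

theorem pv_find_nil (ch : Char) : PySem.Chars.find ([] : List Char) [ch] = -1 := by
  unfold PySem.Chars.find
  exact pv_find_go_nil ch 0

theorem pv_find_go_shift (ch : Char) (t : List Char) (k : Nat) :
    PySem.Chars.find.go [ch] t k =
      if PySem.Chars.find t [ch] = -1 then -1 else PySem.Chars.find t [ch] + (k : Int) := by
  induction t generalizing k with
  | nil => simp [pv_find_go_nil, pv_find_nil]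
  | cons c rest ih =>
    rw [PySem.Chars.find.go]
    conv_rhs => unfold PySem.Chars.find
    rw [PySem.Chars.find.go]
    simp only [List.isPrefixOf, Bool.and_true]
    by_cases hc : ch == c
    · simp [hc]
    · simp only [hc, Bool.false_eq_true, if_false]
      rw [ih (k+1), ih 1]
      split
      · simp
      · have hge : -1 ≤ PySem.Chars.find rest [ch] := PySem.Chars.neg_one_le_find rest [ch]
        rename_i h
        rw [if_neg (by omega)]
        push_cast
        omega

theorem pv_find_cons (c ch : Char) (t : List Char) :
    PySem.Chars.find (c :: t) [ch] =
      if ch = c then 0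
      else if PySem.Chars.find t [ch] = -1 then -1 else PySem.Chars.find t [ch] + 1 := by
  conv_lhs => unfold PySem.Chars.find
  rw [PySem.Chars.find.go]
  simp only [List.isPrefixOf, Bool.and_true, beq_iff_eq]
  split
  · rfl
  · rw [pv_find_go_shift]
    norm_num

theorem pv_findFrom_gt (cs : List Char) (ch : Char) (e : Int) (he : (cs.length : Int) < e) :
    PySem.Chars.findFrom cs [ch] e none = -1 := by
  unfold PySem.Chars.findFrom
  have h0 : ¬ (e < 0) := by omega
  simp only [h0, if_false]
  rw [if_pos he]

theorem pv_maxD_eq (xs : List Int) (k : Int) (hmem : k ∈ xs) (hle : ∀ v ∈ xs, v ≤ k) :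
    PySem.List.maxD xs (fun x => x) (-1) = k := by
  unfold PySem.List.maxD
  cases hm : PySem.List.max? xs (fun x => x) with
  | none =>
    exact absurd ((PySem.List.max?_eq_none_iff xs _).mp hm ▸ hmem) (List.not_mem_nil)
  | some m =>
    have h1 : m ∈ xs := PySem.List.max?_mem hm
    have h2 := PySem.List.max?_isMax hm k hmem
    have h3 := hle m h1
    simp only [Option.getD_some]
    omega

theorem pv_min_match (xs : List Int) (k : Int) (d : Int) (hk : 0 ≤ k) (hmem : k ∈ xs)
    (hge : ∀ v ∈ xs, v = -1 ∨ k ≤ v) :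
    (match PySem.List.min? (xs.filter (fun i => i != -1)) (fun x => x) with
     | some m => m + 1
     | none => d) = k + 1 := by
  have hkf : k ∈ xs.filter (fun i => i != -1) := by
    rw [List.mem_filter]
    exact ⟨hmem, by simp; omega⟩
  cases hm : PySem.List.min? (xs.filter (fun i => i != -1)) (fun x => x) with
  | none =>
    exact absurd ((PySem.List.min?_eq_none_iff _ _).mp hm ▸ hkf) (List.not_mem_nil)
  | some m =>
    have h1 : m ∈ xs.filter (fun i => i != -1) := PySem.List.min?_mem hm
    rw [List.mem_filter] at h1
    have h2 := PySem.List.min?_isMin hm k hkf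
    have h3 := hge m h1.1
    have h4 : m ≠ -1 := by simpa using h1.2
    show m + 1 = k + 1
    omega

theorem pv_backward (cs : List Char) (k : Nat) (hk : k ≤ cs.length) :
    pvALoop1 cs (PySem.List.pyRange ((k : Int) - 1) (-1) (-1)) =
      PySem.List.maxD (pvDelims.map (fun ch => PySem.Chars.rfind (cs.take k) [ch])) (fun x => x) (-1) + 1 := by
  induction k with
  | zero =>
    rw [PySem.List.pyRange_neg_one_eq_nil (by omega)]
    rw [pv_maxD_eq _ (-1) (by simp [pvDelims, pv_rfind_nil]) (by simp [pvDelims, pv_rfind_nil])]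
    rfl
  | succ k ih =>
    have hkl : k < cs.length := by omega
    rw [show ((k+1 : Nat) : Int) - 1 = (k : Int) by push_cast; omega]
    rw [PySem.List.pyRange_neg_one_cons (by omega : (-1:Int) < (k:Int))]
    have hget : PySem.List.pyGet? cs ((k : Nat) : Int) = some cs[k] := by
      rw [PySem.List.pyGet?_natCast, List.getElem?_eq_getElem hkl]
    rw [pvALoop1, hget]
    have htake : cs.take (k+1) = cs.take k ++ [cs[k]] := by
      rw [List.take_add_one, List.getElem?_eq_getElem hkl]; rfl
    have hmap : pvDelims.map (fun ch => PySem.Chars.rfind (cs.take (k+1)) [ch]) =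
        pvDelims.map (fun ch => if ch = cs[k] then (k : Int) else PySem.Chars.rfind (cs.take k) [ch]) := by
      apply List.map_congr_left
      intro ch _
      rw [htake, pv_rfind_concat, List.length_take, min_eq_left (by omega)]
    rw [hmap]
    by_cases hc : pvDelims.contains cs[k]
    · have hmemD : cs[k] ∈ pvDelims := by simpa using hc
      simp only [hc, if_true]
      rw [pv_maxD_eq _ (k : Int)
        (List.mem_map.mpr ⟨cs[k], hmemD, by simp⟩)
        (by
          intro v hv
          obtain ⟨ch, _, rfl⟩ := List.mem_map.mp hv
          split
          · omega
          · have := pv_rfind_single_lt (cs.take k) ch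
            rw [List.length_take, min_eq_left (by omega)] at this
            omega)]
    · simp only [hc, Bool.false_eq_true, if_false]
      have hne : ∀ ch ∈ pvDelims, ¬ (ch = cs[k]) := by
        intro ch hch heq
        exact hc (by subst heq; simpa using hch)
      rw [List.map_congr_left (fun ch hch => by rw [if_neg (hne ch hch)])]
      exact ih (by omega)

theorem pv_forward (cs : List Char) (k : Nat) (hk : k ≤ cs.length) :
    pvALoop2 cs (PySem.List.pyRange (k : Int) (cs.length : Int) 1) =
      (match PySem.List.min?
          ((pvDelims.map (fun ch => PySem.Chars.findFrom cs [ch] (k : Int) none)).filter (fun i => i != -1))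
          (fun x => x) with
       | some m => m + 1
       | none => (cs.length : Int)) := by
  induction hfuel : cs.length - k generalizing k with
  | zero =>
    rw [show k = cs.length by omega]
    rw [PySem.List.pyRange_one_eq_nil (by omega)]
    have hall : ∀ ch ∈ pvDelims, PySem.Chars.findFrom cs [ch] (cs.length : Int) none = -1 := by
      intro ch _
      rw [PySem.Chars.findFrom_natCast cs [ch] cs.length (le_refl _)]
      simp [List.drop_length, pv_find_nil]
    have hfil : (pvDelims.map (fun ch => PySem.Chars.findFrom cs [ch] (cs.length : Int) none)).filter
        (fun i => i != -1) = [] := by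
      rw [List.filter_eq_nil_iff]
      intro v hv
      obtain ⟨ch, hch, rfl⟩ := List.mem_map.mp hv
      simp [hall ch hch]
    rw [hfil]
    rfl
  | succ m ih =>
    have hkl : k < cs.length := by omega
    rw [PySem.List.pyRange_one_cons (by exact_mod_cast hkl)]
    have hget : PySem.List.pyGet? cs ((k : Nat) : Int) = some cs[k] := by
      rw [PySem.List.pyGet?_natCast, List.getElem?_eq_getElem hkl]
    rw [pvALoop2, hget]
    have hdrop : cs.drop k = cs[k] :: cs.drop (k+1) := by
      rw [List.drop_eq_getElem_cons hkl]
    by_cases hc : pvDelims.contains cs[k]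
    · have hmemD : cs[k] ∈ pvDelims := by simpa using hc
      simp only [hc, if_true]
      rw [pv_min_match _ (k : Int) _ (by omega)
        (List.mem_map.mpr ⟨cs[k], hmemD, by
          rw [PySem.Chars.findFrom_natCast cs [cs[k]] k (by omega), hdrop, pv_find_cons]
          simp⟩)
        (by
          intro v hv
          obtain ⟨ch, _, rfl⟩ := List.mem_map.mp hv
          rw [PySem.Chars.findFrom_natCast cs [ch] k (by omega)]
          have := PySem.Chars.neg_one_le_find (cs.drop k) [ch]
          split
          · left; rfl
          · right; omega)]
    · simp only [hc, Bool.false_eq_true, if_false]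
      have hne : ∀ ch ∈ pvDelims, ¬ (ch = cs[k]) := by
        intro ch hch heq
        exact hc (by subst heq; simpa using hch)
      have hmap : pvDelims.map (fun ch => PySem.Chars.findFrom cs [ch] (k : Int) none) =
          pvDelims.map (fun ch => PySem.Chars.findFrom cs [ch] ((k+1 : Nat) : Int) none) := by
        apply List.map_congr_left
        intro ch hch
        rw [PySem.Chars.findFrom_natCast cs [ch] k (by omega),
            PySem.Chars.findFrom_natCast cs [ch] (k+1) (by omega),
            hdrop, pv_find_cons, if_neg (hne ch hch)]
        have hge := PySem.Chars.neg_one_le_find (cs.drop (k+1)) [ch]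
        by_cases hf : PySem.Chars.find (cs.drop (k+1)) [ch] = -1
        · simp [hf]
        · simp only [if_neg hf]
          rw [if_neg (show ¬ (PySem.Chars.find (cs.drop (k+1)) [ch] + 1 = -1) by omega)]
          push_cast; omega
      rw [hmap]
      rw [show ((k : Nat) : Int) + 1 = ((k+1 : Nat) : Int) by push_cast; ring]
      exact ih (k+1) (by omega) (by omega)

theorem pv_loop2_pos (cs : List Char) (k : Nat) (hk : k ≤ cs.length) :
    pvALoop2 cs (PySem.List.pyRange (k : Int) (cs.length : Int) 1) =
      if (cs.drop k).all (fun c => !pvDelims.contains c) then (cs.length : Int)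
      else (k : Int) + (((cs.drop k).takeWhile (fun c => !pvDelims.contains c)).length : Int) + 1 := by
  induction hfuel : cs.length - k generalizing k with
  | zero =>
    rw [show k = cs.length by omega]
    rw [PySem.List.pyRange_one_eq_nil (by omega)]
    simp [List.drop_length, pvALoop2]
  | succ m ih =>
    have hkl : k < cs.length := by omega
    rw [PySem.List.pyRange_one_cons (by exact_mod_cast hkl)]
    have hget : PySem.List.pyGet? cs ((k : Nat) : Int) = some cs[k] := by
      rw [PySem.List.pyGet?_natCast, List.getElem?_eq_getElem hkl]
    rw [pvALoop2, hget]
    have hdrop : cs.drop k = cs[k] :: cs.drop (k+1) := List.drop_eq_getElem_cons hkl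
    rw [hdrop]
    by_cases hc : pvDelims.contains cs[k]
    · have hnd : (!pvDelims.contains cs[k]) = false := by rw [hc]; rfl
      simp only [hc, if_true]
      rw [if_neg (by simp only [List.all_cons, hnd, Bool.false_and]; exact Bool.false_ne_true)]
      simp only [List.takeWhile_cons, hnd, Bool.false_eq_true, if_false, List.length_nil]
      push_cast; ring
    · have hcb : pvDelims.contains cs[k] = false := by simpa using hc
      have hnd : (!pvDelims.contains cs[k]) = true := by rw [hcb]; rfl
      simp only [hcb, Bool.false_eq_true, if_false]
      simp only [List.all_cons, hnd, Bool.true_and, List.takeWhile_cons, if_true]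
      rw [show ((k : Nat) : Int) + 1 = ((k+1 : Nat) : Int) by push_cast; ring]
      rw [ih (k+1) (by omega) (by omega)]
      split
      · rfl
      · simp only [List.length_cons]; push_cast; ring

theorem pv_loop2_neg (cs : List Char) (k : Nat) (hk : k ≤ cs.length) (rest : List Int) :
    pvALoop2 cs (PySem.List.pyRange (-(k : Int)) 0 1 ++ rest) =
      if (cs.drop (cs.length - k)).all (fun c => !pvDelims.contains c) then pvALoop2 cs rest
      else ((cs.length - k : Nat) : Int) +
        (((cs.drop (cs.length - k)).takeWhile (fun c => !pvDelims.contains c)).length : Int) + 1 - (cs.length : Int) := by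
  induction k with
  | zero =>
    rw [show (-(0:Nat) : Int) = 0 by norm_num, PySem.List.pyRange_one_eq_nil (by omega)]
    simp [List.drop_length]
  | succ k ih =>
    rw [PySem.List.pyRange_one_cons (by push_cast; omega : (-(k+1 : Nat) : Int) < 0), List.cons_append]
    have hget : PySem.List.pyGet? cs (-(k+1 : Nat) : Int) = some cs[cs.length - (k+1)] := by
      rw [PySem.List.pyGet?_neg_natCast cs (k+1) (by omega) (by omega),
          List.getElem?_eq_getElem (by omega)]
    rw [pvALoop2, hget]
    have hdrop : cs.drop (cs.length - (k+1)) = cs[cs.length - (k+1)] :: cs.drop (cs.length - k) := by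
      rw [List.drop_eq_getElem_cons (by omega)]
      congr 2
      omega
    rw [hdrop]
    by_cases hc : pvDelims.contains cs[cs.length - (k+1)]
    · have hnd : (!pvDelims.contains cs[cs.length - (k+1)]) = false := by rw [hc]; rfl
      simp only [hc, if_true]
      rw [if_neg (by simp only [List.all_cons, hnd, Bool.false_and]; exact Bool.false_ne_true)]
      simp only [List.takeWhile_cons, hnd, Bool.false_eq_true, if_false, List.length_nil]
      push_cast; omega
    · have hcb : pvDelims.contains cs[cs.length - (k+1)] = false := by simpa using hc
      have hnd : (!pvDelims.contains cs[cs.length - (k+1)]) = true := by rw [hcb]; rfl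
      simp only [hcb, Bool.false_eq_true, if_false]
      simp only [List.all_cons, hnd, Bool.true_and, List.takeWhile_cons, if_true]
      rw [show (-(k+1:Nat) : Int) + 1 = -(k : Int) by push_cast; ring]
      rw [ih (by omega)]
      split
      · rfl
      · simp only [List.length_cons]; push_cast; omega

theorem pv_findFrom_neg (cs : List Char) (ch : Char) (e : Int) (h1 : -(cs.length : Int) ≤ e) (h2 : e < 0) :
    PySem.Chars.findFrom cs [ch] e none =
      PySem.Chars.findFrom cs [ch] (((cs.length : Int) + e).toNat : Int) none := by
  unfold PySem.Chars.findFrom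
  have hnn : ¬ ((((cs.length : Int) + e).toNat : Int) < 0) := by omega
  have heq : ((((cs.length : Int) + e).toNat : Int)) = (cs.length : Int) + e := by omega
  simp only [h2, if_true]
  rw [if_neg hnn]
  rw [if_neg (by omega : ¬ (e + (cs.length:Int) < 0))]
  rw [heq]
  rw [show e + (cs.length : Int) = (cs.length : Int) + e by ring]

theorem pv_slice_stop_congr {α : Type} (xs : List α) (a b b' : Int)
    (h : PySem.List.clampIdx xs.length b = PySem.List.clampIdx xs.length b') :
    PySem.List.slice xs (some a) (some b) = PySem.List.slice xs (some a) (some b') := by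
  show List.take (PySem.List.clampIdx xs.length b - PySem.List.clampIdx xs.length a) (List.drop (PySem.List.clampIdx xs.length a) xs) =
    List.take (PySem.List.clampIdx xs.length b' - PySem.List.clampIdx xs.length a) (List.drop (PySem.List.clampIdx xs.length a) xs)
  rw [h]

theorem pv_takeWhile_lt {a : Type} (p : a -> Bool) (l : List a) (h : ¬ l.all p) :
    (l.takeWhile p).length < l.length := by
  induction l with
  | nil => simp at h
  | cons x t ih =>
    by_cases hx : p x
    · simp only [List.takeWhile_cons, hx, if_true, List.length_cons]
      have : ¬ t.all p := by simpa [hx] using h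
      have := ih this
      omega
    · simp only [List.takeWhile_cons, hx, Bool.false_eq_true, if_false, List.length_nil, List.length_cons]
      omega

theorem pv_loop1_spec (cs : List Char) (k : Nat) (hk : k ≤ cs.length) :
    pvALoop1 cs (PySem.List.pyRange ((k : Int) - 1) (-1) (-1)) =
      (k : Int) - (((cs.take k).reverse.takeWhile (fun c => !pvDelims.contains c)).length : Int) := by
  induction k with
  | zero =>
    rw [PySem.List.pyRange_neg_one_eq_nil (by omega)]
    simp [pvALoop1]
  | succ k ih =>
    have hkl : k < cs.length := by omega
    rw [show ((k+1 : Nat) : Int) - 1 = (k : Int) by push_cast; omega]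
    rw [PySem.List.pyRange_neg_one_cons (by omega : (-1:Int) < (k:Int))]
    have hget : PySem.List.pyGet? cs ((k : Nat) : Int) = some cs[k] := by
      rw [PySem.List.pyGet?_natCast, List.getElem?_eq_getElem hkl]
    rw [pvALoop1, hget]
    have hrev : (cs.take (k+1)).reverse = cs[k] :: (cs.take k).reverse := by
      rw [List.take_add_one, List.getElem?_eq_getElem hkl]
      simp
    rw [hrev]
    by_cases hc : pvDelims.contains cs[k]
    · have hnd : (!pvDelims.contains cs[k]) = false := by rw [hc]; rfl
      simp only [hc, if_true, List.takeWhile_cons, Bool.not_true, Bool.false_eq_true, if_false,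
        List.length_nil]
      push_cast; omega
    · have hcb : pvDelims.contains cs[k] = false := by simpa using hc
      have hnd : (!pvDelims.contains cs[k]) = true := by rw [hcb]; rfl
      simp only [hcb, Bool.false_eq_true, if_false, List.takeWhile_cons, Bool.not_false, if_true,
        List.length_cons]
      rw [ih (by omega)]
      push_cast; omega

theorem pv_strip_append_space (x w : List Char) (hw : w.all PySem.Chars.isspace) :
    PySem.Chars.strip (x ++ w) = PySem.Chars.strip x := by
  unfold PySem.Chars.strip PySem.Chars.lstrip PySem.Chars.rstrip
  rw [List.dropWhile_append]
  split
  · rename_i hemp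
    have hx : x.all PySem.Chars.isspace := by
      rw [List.isEmpty_iff, List.dropWhile_eq_nil_iff] at hemp
      exact List.all_eq_true.mpr (fun a ha => hemp a ha)
    have hwd : List.dropWhile PySem.Chars.isspace w = [] := by
      rw [List.dropWhile_eq_nil_iff]
      exact fun a ha => List.all_eq_true.mp hw a ha
    have hxd : List.dropWhile PySem.Chars.isspace x = [] := by
      rw [List.dropWhile_eq_nil_iff]
      exact fun a ha => List.all_eq_true.mp hx a ha
    rw [hwd, hxd]
  · rw [List.reverse_append, List.dropWhile_append]
    have hwr : List.dropWhile PySem.Chars.isspace w.reverse = [] := by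
      rw [List.dropWhile_eq_nil_iff]
      intro a ha
      exact List.all_eq_true.mp hw a (List.mem_reverse.mp ha)
    rw [hwr]
    simp

theorem pv_strip_all_space (w : List Char) (hw : w.all PySem.Chars.isspace) :
    PySem.Chars.strip w = [] := by
  have := pv_strip_append_space [] w hw
  simpa using this

theorem pv_strip_ne_nil (w : List Char) (hw : ¬ w.all PySem.Chars.isspace) :
    PySem.Chars.strip w ≠ [] := by
  intro h
  apply hw
  unfold PySem.Chars.strip PySem.Chars.lstrip PySem.Chars.rstrip at h
  rw [List.reverse_eq_nil_iff, List.dropWhile_eq_nil_iff] at h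
  have hl : (List.dropWhile PySem.Chars.isspace w).all PySem.Chars.isspace := by
    rw [List.all_eq_true]
    intro a ha
    exact h a (by simpa using List.mem_reverse.mpr ha)
  rw [← List.takeWhile_append_dropWhile (p := PySem.Chars.isspace) (l := w)]
  rw [List.all_append, Bool.and_eq_true]
  refine ⟨?_, hl⟩
  rw [List.all_eq_true]
  intro a ha
  exact List.mem_takeWhile_imp ha

theorem pv_strip_append_ne (u v : List Char) (hv : ¬ v.all PySem.Chars.isspace) :
    PySem.Chars.strip (u ++ v) ≠ PySem.Chars.strip u := by
  by_cases hu : u.all PySem.Chars.isspace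
  · rw [pv_strip_all_space u hu]
    apply pv_strip_ne_nil
    rw [List.all_append, Bool.and_eq_true]
    intro h
    exact hv h.2
  · intro h
    have hlen := congrArg List.length h
    unfold PySem.Chars.strip PySem.Chars.lstrip PySem.Chars.rstrip at hlen
    rw [List.dropWhile_append] at hlen
    rw [if_neg (by
      rw [Bool.not_eq_true, List.isEmpty_eq_false_iff, Ne, List.dropWhile_eq_nil_iff]
      intro hall
      exact hu (List.all_eq_true.mpr hall))] at hlen
    rw [List.reverse_append, List.dropWhile_append] at hlen
    have hvr : ¬ (List.dropWhile PySem.Chars.isspace v.reverse).isEmpty = true := by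
      rw [Bool.not_eq_true, List.isEmpty_eq_false_iff, Ne, List.dropWhile_eq_nil_iff]
      intro hall
      exact hv (List.all_eq_true.mpr (fun a ha => hall a (List.mem_reverse.mpr ha)))
    rw [if_neg hvr] at hlen
    simp only [List.length_reverse, List.length_append] at hlen
    have h1 : 1 ≤ (List.dropWhile PySem.Chars.isspace v.reverse).length := by
      rcases hd : List.dropWhile PySem.Chars.isspace v.reverse with _ | ⟨a, t⟩
      · exact absurd (by rw [hd]; rfl) hvr
      · simp
    have h2 : (List.dropWhile PySem.Chars.isspace (List.dropWhile PySem.Chars.isspace u).reverse).length ≤ (List.dropWhile PySem.Chars.isspace u).reverse.length := List.length_dropWhile_le _ _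
    simp only [List.length_reverse] at h2
    omega

theorem pv_slice_zero {α : Type} (xs : List α) (a : Int) :
    PySem.List.slice xs (some a) (some 0) = [] := by
  show List.take (PySem.List.clampIdx xs.length 0 - PySem.List.clampIdx xs.length a)
      (List.drop (PySem.List.clampIdx xs.length a) xs) = []
  have h0 : PySem.List.clampIdx xs.length 0 = 0 := by
    unfold PySem.List.clampIdx; simp
  rw [h0, Nat.zero_sub, List.take_zero]

theorem pv_slice_full {α : Type} (xs : List α) (a : Nat) :
    PySem.List.slice xs (some (a : Int)) (some (xs.length : Int)) = xs.drop a := by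
  rw [PySem.List.slice_natCast]
  apply List.take_of_length_le
  simp

theorem pv_slice_split {α : Type} (xs : List α) (a b : Nat) :
    PySem.List.slice xs (some (a : Int)) (some (xs.length : Int)) =
      PySem.List.slice xs (some (a : Int)) (some (b : Int)) ++ xs.drop (max a b) := by
  rw [pv_slice_full, PySem.List.slice_natCast]
  by_cases hab : a ≤ b
  · rw [max_eq_right hab]
    rw [show xs.drop b = (xs.drop a).drop (b - a) by rw [List.drop_drop]; congr 1; omega]
    exact (List.take_append_drop _ _).symm
  · rw [max_eq_left (by omega), show b - a = 0 by omega, List.take_zero, List.nil_append]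

theorem pv_len_dropWhile {a : Type} (p : a → Bool) (l : List a) :
    (l.dropWhile p).length = l.length - (l.takeWhile p).length := by
  have := congrArg List.length (List.takeWhile_append_dropWhile (p := p) (l := l))
  rw [List.length_append] at this
  omega

theorem pv_rdropWhile_len (p : Char → Bool) (l : List Char) :
    (l.rdropWhile p).length = l.length - (l.reverse.takeWhile p).length := by
  rw [List.rdropWhile, List.length_reverse, pv_len_dropWhile, List.length_reverse]

-- closed form of port A for an in-range negative end
theorem pv_A_neg (text : String) (start end_ : Int)
    (h2 : start ≤ (text.toList.length : Int)) (h3 : -(text.toList.length : Int) ≤ end_)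
    (hneg : end_ < 0) :
    find_containing_sentence_py text start end_ =
      String.ofList (PySem.Chars.strip (PySem.Chars.slice text.toList
        (some ((((text.toList.take start.toNat).rdropWhile (fun c => !pvDelims.contains c)).length : Nat) : Int))
        (some (
          if (text.toList.drop ((text.toList.length : Int) + end_).toNat).all (fun c => !pvDelims.contains c) then
            (if text.toList.all (fun c => !pvDelims.contains c) then (text.toList.length : Int)
             else ((text.toList.takeWhile (fun c => !pvDelims.contains c)).length : Int) + 1)
          else ((((text.toList.length : Int) + end_).toNat : Int) +
            (((text.toList.drop ((text.toList.length : Int) + end_).toNat).takeWhile (fun c => !pvDelims.contains c)).length : Int) + 1 - (text.toList.length : Int)))))) := by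
  unfold find_containing_sentence_py
  simp only []
  have hks : start.toNat ≤ text.toList.length := by omega
  have hrange : PySem.List.pyRange (start - 1) (-1) (-1) =
      PySem.List.pyRange ((start.toNat : Int) - 1) (-1) (-1) := by
    by_cases hs0 : 0 ≤ start
    · rw [show ((start.toNat : Nat) : Int) = start by omega]
    · rw [PySem.List.pyRange_neg_one_eq_nil (by omega),
          PySem.List.pyRange_neg_one_eq_nil (by omega)]
  have htw : ((text.toList.take start.toNat).reverse.takeWhile (fun c => !pvDelims.contains c)).length ≤ start.toNat := by
    calc ((text.toList.take start.toNat).reverse.takeWhile (fun c => !pvDelims.contains c)).length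
        ≤ (text.toList.take start.toNat).reverse.length := (List.takeWhile_sublist _).length_le
      _ ≤ start.toNat := by simp
  have hS : (start.toNat : Int) -
      (((text.toList.take start.toNat).reverse.takeWhile (fun c => !pvDelims.contains c)).length : Int) =
      ((((text.toList.take start.toNat).rdropWhile (fun c => !pvDelims.contains c)).length : Nat) : Int) := by
    rw [pv_rdropWhile_len]
    have hlt : (text.toList.take start.toNat).length = start.toNat := by
      rw [List.length_take]; omega
    rw [hlt]
    omega
  rw [hrange, pv_loop1_spec text.toList start.toNat hks, hS]
  have hsplit : PySem.List.pyRange end_ (text.toList.length : Int) 1 =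
      PySem.List.pyRange end_ 0 1 ++ PySem.List.pyRange 0 (text.toList.length : Int) 1 :=
    PySem.List.pyRange_one_append end_ 0 (text.toList.length : Int) (by omega) (by omega)
  have hnegk : end_ = -(((-end_).toNat : Nat) : Int) := by omega
  have hlenk : text.toList.length - (-end_).toNat = ((text.toList.length : Int) + end_).toNat := by omega
  rw [hsplit, show PySem.List.pyRange end_ 0 1 = PySem.List.pyRange (-(((-end_).toNat : Nat) : Int)) 0 1 by rw [← hnegk],
      pv_loop2_neg text.toList (-end_).toNat (by omega) _, hlenk]
  rw [show (PySem.List.pyRange 0 (text.toList.length : Int) 1) =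
      (PySem.List.pyRange ((0 : Nat) : Int) (text.toList.length : Int) 1) by norm_num]
  rw [pv_loop2_pos text.toList 0 (by omega)]
  simp only [List.drop_zero, Nat.cast_zero, zero_add]

-- closed form of port B for an in-range negative end
theorem pv_B_neg (text : String) (start end_ : Int)
    (h2 : start ≤ (text.toList.length : Int)) (h3 : -(text.toList.length : Int) ≤ end_)
    (hneg : end_ < 0) :
    find_containing_sentence_py_alt text start end_ =
      String.ofList (PySem.Chars.strip (PySem.Chars.slice text.toList
        (some ((((text.toList.take start.toNat).rdropWhile (fun c => !pvDelims.contains c)).length : Nat) : Int))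
        (some (
          if (text.toList.drop ((text.toList.length : Int) + end_).toNat).all (fun c => !pvDelims.contains c) then
            (text.toList.length : Int)
          else ((((text.toList.length : Int) + end_).toNat : Int) +
            (((text.toList.drop ((text.toList.length : Int) + end_).toNat).takeWhile (fun c => !pvDelims.contains c)).length : Int) + 1))))) := by
  unfold find_containing_sentence_py_alt
  simp only []
  have hks : start.toNat ≤ text.toList.length := by omega
  have hmapS : pvDelims.map (fun ch => PySem.Chars.rfindFrom text.toList [ch] 0 (some (max start 0))) =
      pvDelims.map (fun ch => PySem.Chars.rfind (text.toList.take start.toNat) [ch]) := by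
    apply List.map_congr_left
    intro ch _
    rw [show max start 0 = ((start.toNat : Nat) : Int) from (Int.ofNat_toNat start).symm]
    exact pv_rfindFrom_take text.toList ch start.toNat hks
  have htw : ((text.toList.take start.toNat).reverse.takeWhile (fun c => !pvDelims.contains c)).length ≤ start.toNat := by
    calc ((text.toList.take start.toNat).reverse.takeWhile (fun c => !pvDelims.contains c)).length
        ≤ (text.toList.take start.toNat).reverse.length := (List.takeWhile_sublist _).length_le
      _ ≤ start.toNat := by simp
  have hS : pvALoop1 text.toList (PySem.List.pyRange ((start.toNat : Int) - 1) (-1) (-1)) =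
      ((((text.toList.take start.toNat).rdropWhile (fun c => !pvDelims.contains c)).length : Nat) : Int) := by
    rw [pv_loop1_spec text.toList start.toNat hks, pv_rdropWhile_len]
    have hlt : (text.toList.take start.toNat).length = start.toNat := by
      rw [List.length_take]; omega
    rw [hlt]
    omega
  rw [hmapS, ← pv_backward text.toList start.toNat hks, hS]
  have hkee : ((text.toList.length : Int) + end_).toNat ≤ text.toList.length := by omega
  have hmapE : pvDelims.map (fun ch => PySem.Chars.findFrom text.toList [ch] end_ none) =
      pvDelims.map (fun ch => PySem.Chars.findFrom text.toList [ch]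
        (((((text.toList.length : Int) + end_).toNat : Nat) : Int)) none) := by
    apply List.map_congr_left
    intro ch _
    exact pv_findFrom_neg text.toList ch end_ (by omega) hneg
  rw [hmapE, ← pv_forward text.toList (((text.toList.length : Int) + end_).toNat) hkee,
      pv_loop2_pos text.toList (((text.toList.length : Int) + end_).toNat) hkee]

-- ===== VERDICT (by name: the statement is the Claim_ definition above) =====
theorem find_containing_sentence_py_spec : Claim_unchanged_find_containing_sentence_py := by
  intro text start end_ _ hpre
  unfold Spec_find_containing_sentence_py
  intro hD
  obtain ⟨h2, h3⟩ := hpre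
  rw [PySem.Str.len_eq] at h2 h3
  by_cases hneg : end_ < 0
  case neg =>
    -- nonnegative end: both starts agree by pv_backward, both ends by pv_forward
    rw [not_lt] at hneg
    unfold find_containing_sentence_py find_containing_sentence_py_alt
    simp only []
    set cs := text.toList with hcs
    have hks : start.toNat ≤ cs.length := by omega
    have hrange : PySem.List.pyRange (start - 1) (-1) (-1) =
        PySem.List.pyRange ((start.toNat : Int) - 1) (-1) (-1) := by
      by_cases hs0 : 0 ≤ start
      · rw [show ((start.toNat : Nat) : Int) = start by omega]
      · rw [PySem.List.pyRange_neg_one_eq_nil (by omega),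
            PySem.List.pyRange_neg_one_eq_nil (by omega)]
    have hmapS : pvDelims.map (fun ch => PySem.Chars.rfindFrom cs [ch] 0 (some (max start 0))) =
        pvDelims.map (fun ch => PySem.Chars.rfind (cs.take start.toNat) [ch]) := by
      apply List.map_congr_left
      intro ch _
      rw [show max start 0 = ((start.toNat : Nat) : Int) from (Int.ofNat_toNat start).symm]
      exact pv_rfindFrom_take cs ch start.toNat hks
    have hs : pvALoop1 cs (PySem.List.pyRange (start - 1) (-1) (-1)) =
        PySem.List.maxD (pvDelims.map (fun ch => PySem.Chars.rfindFrom cs [ch] 0 (some (max start 0))))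
          (fun x => x) (-1) + 1 := by
      rw [hrange, pv_backward cs start.toNat hks, hmapS]
    rw [hs]
    have he : pvALoop2 cs (PySem.List.pyRange end_ (cs.length : Int) 1) =
        (match PySem.List.min?
            ((pvDelims.map (fun ch => PySem.Chars.findFrom cs [ch] end_ none)).filter (fun i => i != -1))
            (fun x => x) with
         | some m => m + 1
         | none => (cs.length : Int)) := by
      by_cases hle : end_ ≤ (cs.length : Int)
      · rw [show end_ = ((end_.toNat : Nat) : Int) from (Int.toNat_of_nonneg hneg).symm]
        exact pv_forward cs end_.toNat (by omega)
      · rw [PySem.List.pyRange_one_eq_nil (by omega)]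
        have hfil : (pvDelims.map (fun ch => PySem.Chars.findFrom cs [ch] end_ none)).filter
            (fun i => i != -1) = [] := by
          rw [List.filter_eq_nil_iff]
          intro v hv
          obtain ⟨ch, _, rfl⟩ := List.mem_map.mp hv
          simp [pv_findFrom_gt cs ch end_ (by omega)]
        rw [hfil]
        rfl
    rw [he]
  case pos =>
    rw [pv_A_neg text start end_ h2 h3 hneg, pv_B_neg text start end_ h2 h3 hneg]
    unfold D_find_containing_sentence_py at hD
    simp only [] at hD
    have hD' := not_or.mp (fun h => hD ⟨hneg, h⟩)
    have hkeq : text.toList.length - end_.natAbs = ((text.toList.length : Int) + end_).toNat := by omega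
    rw [hkeq] at hD'
    set cs := text.toList with hcs
    set ke := ((cs.length : Int) + end_).toNat with hke
    set nd : Char → Bool := fun c => !pvDelims.contains c with hnd
    set tail := cs.drop ke with htail
    set s := ((cs.take start.toNat).rdropWhile nd).length with hsdef
    set j := (cs.takeWhile nd).length with hj
    have hkee : ke ≤ cs.length := by omega
    have hlen : tail.length = cs.length - ke := by rw [htail]; simp
    have hfl : (tail.dropWhile nd).length = tail.length - (tail.takeWhile nd).length :=
      pv_len_dropWhile nd tail
    have htwle : (tail.takeWhile nd).length ≤ tail.length := (List.takeWhile_sublist _).length_le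
    by_cases hall : tail.all nd
    · rw [if_pos hall, if_pos hall]
      have hfl0 : (tail.dropWhile nd).length = 0 := by
        rw [List.dropWhile_eq_nil_iff.mpr (fun a ha => List.all_eq_true.mp hall a ha)]
        rfl
      have hws : (cs.drop (s.max (j + 1))).all PySem.Chars.isspace := by
        by_contra hws'
        exact hD'.2 ⟨hfl0, hws'⟩
      by_cases hcsall : cs.all nd
      · rw [if_pos hcsall]
      · rw [if_neg hcsall]
        have hjlt : j < cs.length := pv_takeWhile_lt nd cs (by simpa using hcsall)
        have hmm : s.max (j + 1) = max s (j + 1) := rfl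
        rw [hmm] at hws
        rw [show ((j : Int) + 1) = (((j + 1 : Nat) : Nat) : Int) by push_cast; ring]
        simp only [PySem.Chars.slice_eq_listSlice]
        rw [pv_slice_split cs s (j + 1)]
        rw [pv_strip_append_space _ _ hws]
    · rw [if_neg hall, if_neg hall]
      have hkl : (tail.takeWhile nd).length < tail.length := pv_takeWhile_lt nd tail (by simpa using hall)
      by_cases hlast : (tail.takeWhile nd).length + 1 = tail.length
      · -- inside D (first disjunct) unless the suffix from s is all whitespace
        have hfl1 : (tail.dropWhile nd).length = 1 := by omega
        have hws : (cs.drop s).all PySem.Chars.isspace := by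
          by_contra hws'
          exact hD'.1 ⟨hfl1, hws'⟩
        have hA0 : ((ke : Nat) : Int) + ((tail.takeWhile nd).length : Int) + 1 - (cs.length : Int) = 0 := by
          omega
        have hBn : ((ke : Nat) : Int) + ((tail.takeWhile nd).length : Int) + 1 = ((cs.length : Nat) : Int) := by
          omega
        rw [hA0, hBn]
        simp only [PySem.Chars.slice_eq_listSlice]
        rw [pv_slice_zero, pv_slice_full]
        rw [pv_strip_all_space _ hws]
        rfl
      · -- the two stop indices clamp to the same position
        have hslice : PySem.List.slice cs (some ((s : Nat) : Int))
            (some (((ke : Nat) : Int) + ((tail.takeWhile nd).length : Int) + 1 - (cs.length : Int))) =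
            PySem.List.slice cs (some ((s : Nat) : Int))
            (some (((ke : Nat) : Int) + ((tail.takeWhile nd).length : Int) + 1)) := by
          apply pv_slice_stop_congr
          unfold PySem.List.clampIdx
          split_ifs <;> omega
        simp only [PySem.Chars.slice_eq_listSlice]
        rw [hslice]

theorem find_containing_sentence_py_changed : Claim_changed_find_containing_sentence_py := by
  unfold Claim_changed_find_containing_sentence_py
  refine ⟨by decide, by decide, by decide, by decide, by decide, by decide⟩

theorem find_containing_sentence_py_tight : Claim_exact_find_containing_sentence_py := by
  intro text start end_ _ hpre hD
  obtain ⟨h2, h3⟩ := hpre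
  rw [PySem.Str.len_eq] at h2 h3
  unfold D_find_containing_sentence_py at hD
  simp only [] at hD
  obtain ⟨hneg, hcase⟩ := hD
  have hkeq : text.toList.length - end_.natAbs = ((text.toList.length : Int) + end_).toNat := by omega
  rw [hkeq] at hcase
  rw [pv_A_neg text start end_ h2 h3 hneg, pv_B_neg text start end_ h2 h3 hneg]
  set cs := text.toList with hcs
  set ke := ((cs.length : Int) + end_).toNat with hke
  set nd : Char → Bool := fun c => !pvDelims.contains c with hnd
  set tail := cs.drop ke with htail
  set s := ((cs.take start.toNat).rdropWhile nd).length with hsdef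
  set j := (cs.takeWhile nd).length with hj
  have hkee : ke ≤ cs.length := by omega
  have hlen : tail.length = cs.length - ke := by rw [htail]; simp
  have hfl : (tail.dropWhile nd).length = tail.length - (tail.takeWhile nd).length :=
    pv_len_dropWhile nd tail
  have htwle : (tail.takeWhile nd).length ≤ tail.length := (List.takeWhile_sublist _).length_le
  rcases hcase with ⟨hf1, hws⟩ | ⟨hf0, hws⟩
  · -- first tail delimiter is the final character: A returns '', B's sentence is not all space
    have hlast : (tail.takeWhile nd).length + 1 = tail.length := by omega
    have hall : ¬ tail.all nd = true := by
      intro h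
      rw [List.dropWhile_eq_nil_iff.mpr (fun a ha => List.all_eq_true.mp h a ha)] at hf1
      simp at hf1
    rw [if_neg hall, if_neg hall]
    have hA0 : ((ke : Nat) : Int) + ((tail.takeWhile nd).length : Int) + 1 - (cs.length : Int) = 0 := by
      omega
    have hBn : ((ke : Nat) : Int) + ((tail.takeWhile nd).length : Int) + 1 = ((cs.length : Nat) : Int) := by
      omega
    rw [hA0, hBn]
    simp only [PySem.Chars.slice_eq_listSlice]
    rw [pv_slice_zero, pv_slice_full]
    intro heq
    have hlists := congrArg String.toList heq
    simp only [String.toList_ofList] at hlists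
    exact pv_strip_ne_nil _ (by simpa using hws) hlists.symm
  · -- no delimiter after the wrapped position: A cuts at the first delimiter of the text
    have hall : tail.all nd := by
      rw [List.length_eq_zero_iff] at hf0
      rw [List.all_eq_true]
      intro a ha
      by_contra hnda
      have hmem := List.dropWhile_eq_nil_iff.mp hf0
      exact hnda (hmem a ha)
    rw [if_pos hall, if_pos hall]
    have hcsall : ¬ cs.all nd = true := by
      intro h
      apply hws
      have hjL : j = cs.length := by
        rw [hj, List.takeWhile_eq_self_iff.mpr (fun a ha => List.all_eq_true.mp h a ha)]
      have : cs.drop (s.max (j + 1)) = [] := by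
        rw [show s.max (j + 1) = max s (j + 1) from rfl]
        apply List.drop_eq_nil_of_le
        omega
      rw [this]
      rfl
    rw [if_neg hcsall]
    have hjlt : j < cs.length := pv_takeWhile_lt nd cs (by simpa using hcsall)
    have hmm : s.max (j + 1) = max s (j + 1) := rfl
    rw [hmm] at hws
    rw [show ((j : Int) + 1) = (((j + 1 : Nat) : Nat) : Int) by push_cast; ring]
    simp only [PySem.Chars.slice_eq_listSlice]
    rw [pv_slice_split cs s (j + 1)]
    intro heq
    have hlists := congrArg String.toList heq
    simp only [String.toList_ofList] at hlists
    exact pv_strip_append_ne _ _ (by simpa using hws) hlists.symm
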